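-- pv_equiv track=rewrite | github.com/Maxwell-Hunt/Canadian-Computing-Competition-CCC-Solutions | CCC/2013Junior/2013J5.py | greatest
-- ===== SOURCE A (Python) =====
-- def greatest(index, myList):
--     marker = myList[index]
--     for i in range(len(myList)):
--         if(i == index):
--             continue
--         if(myList[i] >= marker):
--             return False
--     return True
-- ===== SOURCE B (Python) =====
-- def greatest(index, myList):
--     m = max(myList)
--     return myList[index] == m and myList.count(m) == 1
-- ===== Notes on version B (the rewrite author's own statement) =====
-- stated objective: simpler
-- what changed: Replaces the manual index-skipping short-circuit loop with two aggregate library passes: the element at index must equal max(myList) and that maximum must occur exactly once.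
-- intended difference: For negative in-range indices A's skip test 'i == index' never matches a loop position, so A always returns False, while B returns True exactly when the element at the (wrapped) index is the unique strict maximum, which is the intended meaning of the test. — e.g. on greatest(-1, [1, 2]): A returns false, B returns true
import Mathlib
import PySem

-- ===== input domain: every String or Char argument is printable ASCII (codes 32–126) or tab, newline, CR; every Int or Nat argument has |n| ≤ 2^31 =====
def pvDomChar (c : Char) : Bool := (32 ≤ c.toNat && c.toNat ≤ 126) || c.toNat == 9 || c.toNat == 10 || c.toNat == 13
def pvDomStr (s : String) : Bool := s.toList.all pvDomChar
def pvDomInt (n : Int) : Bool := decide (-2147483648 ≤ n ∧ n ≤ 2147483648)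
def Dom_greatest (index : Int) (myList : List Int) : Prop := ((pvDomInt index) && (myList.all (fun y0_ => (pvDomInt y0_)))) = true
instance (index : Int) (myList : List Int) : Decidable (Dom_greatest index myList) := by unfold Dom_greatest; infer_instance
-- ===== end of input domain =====

-- B is a simpler two-pass aggregate formulation (max, then count) of A's index-skipping
-- short-circuit loop; on negative in-range indices A's answer is wrong (see D_ below) and B returns the intended one.

-- ===== PORT A =====
-- A's for-loop with its early 'return False', as structural recursion over the range list
def greatestLoop (index : Int) (myList : List Int) (marker : Int) : List Int → Bool
  | [] => true
  | i :: rest =>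
    if i = index then greatestLoop index myList marker rest
    else if marker ≤ PySem.List.pyGetD myList i 0 then false
    else greatestLoop index myList marker rest

def greatest (index : Int) (myList : List Int) : Bool :=
  let marker := PySem.List.pyGetD myList index 0   -- myList[index]; IndexError excluded by Pre_
  greatestLoop index myList marker (PySem.List.pyRange 0 myList.length 1)

-- ===== PORT B =====
def greatest_alt (index : Int) (myList : List Int) : Bool :=
  match PySem.List.max? myList (fun x => x) with   -- max(myList); ValueError on [] excluded by Pre_
  | none => false
  | some m =>
    decide (PySem.List.pyGetD myList index 0 = m) && decide (PySem.List.count myList m = 1)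

-- ===== PRECONDITION & SPEC =====
-- Pre_ = exactly the inputs where the Python A returns (myList[index] does not raise): nonempty list, in-range (possibly negative) index
def Pre_greatest (index : Int) (myList : List Int) : Prop :=
  myList ≠ [] ∧ -(myList.length : Int) ≤ index ∧ index < (myList.length : Int)
instance (index : Int) (myList : List Int) : Decidable (Pre_greatest index myList) := by unfold Pre_greatest; infer_instance
def pvWitness_greatest : Int × List Int := (0, [3, 1, 2])

-- For negative in-range indices A's skip test 'i == index' never matches a loop position, so A always
-- returns False, while B returns True exactly when the element at the (wrapped) index is the unique
-- strict maximum, which is the intended meaning of the test.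
def D_greatest (index : Int) (myList : List Int) : Prop :=
  index < 0 ∧ -(myList.length : Int) ≤ index ∧
  ∀ j : Nat, j < myList.length → j ≠ (myList.length + index).toNat →
    myList.getD j 0 < myList.getD (myList.length + index).toNat 0
instance (index : Int) (myList : List Int) : Decidable (D_greatest index myList) := by unfold D_greatest; infer_instance

def Spec_greatest (index : Int) (myList : List Int) (out : Bool) : Prop :=
  ¬ D_greatest index myList → out = greatest_alt index myList
instance (index : Int) (myList : List Int) (out : Bool) : Decidable (Spec_greatest index myList out) := by unfold Spec_greatest; infer_instance

def pvDiffWitness_greatest : Int × List Int := (-1, [1, 2])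
def pvDiffWitnessOut_greatest : Bool × Bool := (false, true)

-- ===== CLAIM (what is proved, stated in full; the proofs are below) =====
def Claim_unchanged_greatest : Prop := ∀ (index : Int) (myList : List Int), Dom_greatest index myList → Pre_greatest index myList → Spec_greatest index myList (greatest index myList)
def Claim_changed_greatest : Prop := Dom_greatest (pvDiffWitness_greatest.1) (pvDiffWitness_greatest.2) ∧ Pre_greatest (pvDiffWitness_greatest.1) (pvDiffWitness_greatest.2) ∧ D_greatest (pvDiffWitness_greatest.1) (pvDiffWitness_greatest.2) ∧ greatest (pvDiffWitness_greatest.1) (pvDiffWitness_greatest.2) = pvDiffWitnessOut_greatest.1 ∧ greatest_alt (pvDiffWitness_greatest.1) (pvDiffWitness_greatest.2) = pvDiffWitnessOut_greatest.2 ∧ pvDiffWitnessOut_greatest.1 ≠ pvDiffWitnessOut_greatest.2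
def Claim_exact_greatest : Prop := ∀ (index : Int) (myList : List Int), Dom_greatest index myList → Pre_greatest index myList → D_greatest index myList → greatest index myList ≠ greatest_alt index myList

-- ===== LEMMAS AND PROOFS =====

-- "the element at position n is the unique strict maximum" (the inner condition of D_greatest)
def StrictAt (myList : List Int) (n : Nat) : Prop :=
  ∀ j : Nat, j < myList.length → j ≠ n → myList.getD j 0 < myList.getD n 0

theorem greatestLoop_iff (index marker : Int) (myList : List Int) (is : List Int) :
    greatestLoop index myList marker is = true ↔
      ∀ i ∈ is, i ≠ index → PySem.List.pyGetD myList i 0 < marker := by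
  induction is with
  | nil => simp [greatestLoop]
  | cons i rest ih =>
    simp only [greatestLoop]
    split_ifs with h1 h2
    · rw [ih]
      constructor
      · intro h j hj hne
        rcases List.mem_cons.mp hj with rfl | hj
        · exact absurd h1 hne
        · exact h j hj hne
      · intro h j hj hne
        exact h j (List.mem_cons_of_mem _ hj) hne
    · simp only [false_iff]
      intro h
      exact absurd (h i List.mem_cons_self h1) (not_lt.mpr h2)
    · rw [ih]
      constructor
      · intro h j hj hne
        rcases List.mem_cons.mp hj with rfl | hj
        · exact lt_of_not_ge h2
        · exact h j hj hne
      · intro h j hj hne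
        exact h j (List.mem_cons_of_mem _ hj) hne

theorem getD_mem (l : List Int) (j : Nat) (hj : j < l.length) : l.getD j 0 ∈ l := by
  rw [List.getD_eq_getElem l 0 hj]; exact List.getElem_mem hj

-- a unique strict maximum has count 1
theorem count_one_of_strict (l : List Int) : ∀ n : Nat, n < l.length → StrictAt l n →
    l.count (l.getD n 0) = 1 := by
  induction l with
  | nil => intro n hn _; simp at hn
  | cons a t ih =>
    intro n hn hs
    cases n with
    | zero =>
      simp only [List.getD_cons_zero] at hs ⊢
      rw [List.count_cons_self]
      have ht : t.count a = 0 := by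
        rw [List.count_eq_zero]
        intro hm
        obtain ⟨j, hj, hje⟩ := List.mem_iff_getElem.mp hm
        have := hs (j + 1) (by simp; omega) (by omega)
        rw [List.getD_cons_succ, List.getD_eq_getElem t 0 hj, hje] at this
        exact absurd this (lt_irrefl a)
      omega
    | succ k =>
      have hk : k < t.length := by simp at hn; omega
      rw [List.getD_cons_succ]
      have ha : a ≠ t.getD k 0 := by
        have h0 := hs 0 (by simp) (by omega)
        rw [List.getD_cons_zero, List.getD_cons_succ] at h0
        omega
      rw [List.count_cons_of_ne ha]
      apply ih k hk
      intro j hj hne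
      have h1 := hs (j + 1) (by simp; omega) (by omega)
      rwa [List.getD_cons_succ, List.getD_cons_succ] at h1

-- a value occurring at two distinct positions has count ≥ 2
theorem two_le_count (l : List Int) : ∀ i j : Nat, i < l.length → j < l.length → i ≠ j →
    l.getD i 0 = l.getD j 0 → 2 ≤ l.count (l.getD i 0) := by
  induction l with
  | nil => intro i j hi _ _ _; simp at hi
  | cons a t ih =>
    intro i j hi hj hne heq
    match i, j with
    | 0, 0 => exact absurd rfl hne
    | 0, k + 1 =>
      simp only [List.getD_cons_zero, List.getD_cons_succ] at heq ⊢
      rw [List.count_cons_self]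
      have hk : k < t.length := by simp at hj; omega
      have : a ∈ t := heq ▸ getD_mem t k hk
      have := List.count_pos_iff.mpr this
      omega
    | k + 1, 0 =>
      simp only [List.getD_cons_zero, List.getD_cons_succ] at heq ⊢
      rw [heq, List.count_cons_self]
      have hk : k < t.length := by simp at hi; omega
      have : a ∈ t := heq ▸ getD_mem t k hk
      have := List.count_pos_iff.mpr this
      omega
    | k + 1, m + 1 =>
      simp only [List.getD_cons_succ] at heq ⊢
      have h2 := ih k m (by simp at hi; omega) (by simp at hj; omega) (by omega) heq
      rw [List.count_cons]
      omega

-- characterisation of B: under any valid normalisation hm of myList[index], B tests StrictAt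
theorem alt_iff (index : Int) (l : List Int) (n : Nat) (hn : n < l.length)
    (hm : PySem.List.pyGetD l index 0 = l.getD n 0) :
    greatest_alt index l = true ↔ StrictAt l n := by
  have hne : l ≠ [] := by intro h; subst h; simp at hn
  unfold greatest_alt
  cases hmax : PySem.List.max? l (fun x => x) with
  | none => rw [PySem.List.max?_eq_none_iff] at hmax; exact absurd hmax hne
  | some m =>
    have hmem := PySem.List.max?_mem hmax
    have hisMax : ∀ y ∈ l, y ≤ m := fun y hy => PySem.List.max?_isMax hmax y hy
    rw [hm]
    simp only [Bool.and_eq_true, decide_eq_true_eq, PySem.List.count_eq]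
    constructor
    · rintro ⟨h1, h2⟩ j hj hjn
      have hle : l.getD j 0 ≤ m := hisMax _ (getD_mem l j hj)
      rcases lt_or_eq_of_le hle with hlt | heq
      · rw [h1]; exact hlt
      · exfalso
        have := two_le_count l j n hj hn hjn (by rw [heq, h1])
        rw [heq] at this
        omega
    · intro hs
      have h1 : l.getD n 0 = m := by
        obtain ⟨k, hk, hkm⟩ := List.mem_iff_getElem.mp hmem
        rcases eq_or_ne k n with rfl | hkn
        · rw [List.getD_eq_getElem l 0 hk, hkm]
        · exfalso
          have := hs k hk hkn
          have h2 : l.getD n 0 ≤ m := hisMax _ (getD_mem l n hn)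
          rw [List.getD_eq_getElem l 0 hk, hkm] at this
          omega
      refine ⟨h1, ?_⟩
      rw [← h1]
      exact count_one_of_strict l n hn hs

-- normalisation of myList[index] for nonnegative index
theorem pyGetD_norm_pos (l : List Int) (index : Int) (h0 : 0 ≤ index) (h1 : index < (l.length : Int)) :
    PySem.List.pyGetD l index 0 = l.getD index.toNat 0 := by
  rw [PySem.List.pyGetD_eq_getElem l 0 h0 h1, List.getD_eq_getElem l 0 (by omega)]

-- normalisation of myList[index] for negative in-range index (Python wraps to length + index)
theorem pyGetD_norm_neg (l : List Int) (index : Int) (hneg : index < 0) (hb : -(l.length : Int) ≤ index) :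
    PySem.List.pyGetD l index 0 = l.getD (l.length + index).toNat 0 := by
  have hk1 : 0 < (-index).toNat := by omega
  have hk2 : (-index).toNat ≤ l.length := by omega
  have h := PySem.List.pyGetD_neg_natCast l ((-index).toNat) 0 hk1 hk2
  have hidx : -(((-index).toNat : Nat) : Int) = index := by omega
  rw [hidx] at h
  rw [h, List.getD_eq_getElem l 0 (by omega)]
  congr 1
  omega

-- characterisation of A for nonnegative index: the loop tests StrictAt index.toNat
theorem greatest_pos_iff (index : Int) (l : List Int) (h0 : 0 ≤ index) (h1 : index < (l.length : Int)) :
    greatest index l = true ↔ StrictAt l index.toNat := by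
  unfold greatest
  rw [greatestLoop_iff]
  constructor
  · intro h j hj hjn
    have hji : ((j : Int)) ≠ index := by omega
    have := h (j : Int) (by rw [PySem.List.mem_pyRange_one]; constructor <;> omega) hji
    rwa [pyGetD_norm_pos l index h0 h1, PySem.List.pyGetD_natCast, List.getD_eq_getElem l 0 hj,
      ← List.getD_eq_getElem l 0 hj] at this
  · intro h i hi hne
    rw [PySem.List.mem_pyRange_one] at hi
    have hj : i.toNat < l.length := by omega
    have := h i.toNat hj (by omega)
    rw [pyGetD_norm_pos l index h0 h1]
    have hi' : PySem.List.pyGetD l i 0 = l.getD i.toNat 0 := pyGetD_norm_pos l i (by omega) (by omega)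
    rwa [hi']

-- for a negative in-range index A's skip never fires and the loop hits the marker itself
theorem greatest_neg_false (index : Int) (l : List Int) (hneg : index < 0) (hb : -(l.length : Int) ≤ index) :
    greatest index l = false := by
  by_contra h
  rw [Bool.not_eq_false] at h
  unfold greatest at h
  rw [greatestLoop_iff] at h
  have hpos : (0 : Int) ≤ (l.length : Int) + index := by omega
  have := h ((l.length : Int) + index)
    (by rw [PySem.List.mem_pyRange_one]; constructor <;> omega) (by omega)
  rw [pyGetD_norm_neg l index hneg hb] at this
  have hnorm : PySem.List.pyGetD l ((l.length : Int) + index) 0 = l.getD ((l.length : Int) + index).toNat 0 :=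
    pyGetD_norm_pos l _ hpos (by omega)
  rw [hnorm] at this
  exact absurd this (lt_irrefl _)

-- ===== VERDICT (by name: the statement is the Claim_ definition above) =====
theorem greatest_spec : Claim_unchanged_greatest := by
  intro index l _ hpre hnd
  obtain ⟨hne, hb, hlt⟩ := hpre
  by_cases hneg : index < 0
  · rw [greatest_neg_false index l hneg hb]
    cases hB : greatest_alt index l
    · rfl
    · exfalso
      have hn : ((l.length : Int) + index).toNat < l.length := by
        have : l.length ≠ 0 := by simpa using hne
        omega
      have hs := (alt_iff index l ((l.length : Int) + index).toNat hn
        (pyGetD_norm_neg l index hneg hb)).mp hB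
      exact hnd ⟨hneg, hb, fun j hj hjn => hs j hj hjn⟩
  · rw [not_lt] at hneg
    have hn : index.toNat < l.length := by omega
    have h1 := greatest_pos_iff index l hneg hlt
    have h2 := alt_iff index l index.toNat hn (pyGetD_norm_pos l index hneg hlt)
    have := h1.trans h2.symm
    cases hA : greatest index l <;> cases hB : greatest_alt index l <;> simp_all

theorem greatest_changed : Claim_changed_greatest := by unfold Claim_changed_greatest; decide

theorem greatest_tight : Claim_exact_greatest := by
  intro index l _ hpre hd
  obtain ⟨hneg, hb, hs⟩ := hd
  obtain ⟨hne, _, _⟩ := hpre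
  rw [greatest_neg_false index l hneg hb]
  have hn : (l.length + index).toNat < l.length := by
    have : l.length ≠ 0 := by simpa using hne
    omega
  have hB : greatest_alt index l = true :=
    (alt_iff index l _ hn (pyGetD_norm_neg l index hneg hb)).mpr hs
  rw [hB]
  simp
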